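-- pv_equiv track=rewrite | github.com/manik-soin/pcmb_classifier | keyword matcher/KW01 simple matcher/bulktest.py | keyword_matcher
-- ===== SOURCE A (Python) =====
-- def keyword_matcher(test_string,keywords):
--     matches={}
--     for key in keywords.keys():
--        matches[key] = [ele for ele in keywords[key] if((' ' + ele + ' ') in (' ' + test_string + ' '))]
--
--     max_key = max(matches, key= lambda x: len(set(matches[x])))
--
--     total_matches=0
--     for key in matches.keys():
--         total_matches+=len(matches[key])
--
--
--
--     if(total_matches==0):
--         return 'zero_matches'
--     else:
--         return max_key
-- ===== SOURCE B (Python) =====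
-- def keyword_matcher(test_string, keywords):
--     # Index the test string once: collect every segment of the padded string that lies
--     # between two space positions; a keyword matches iff it IS such a segment, so each
--     # keyword check becomes one set lookup instead of a substring scan.
--     padded = ' ' + test_string + ' '
--     sp = [i for i, c in enumerate(padded) if c == ' ']
--     segments = set()
--     for k, a in enumerate(sp):
--         for b in sp[k + 1:]:
--             segments.add(padded[a + 1:b])
--     best = max(keywords, key=lambda key: len({w for w in keywords[key] if w in segments}))
--     total = sum(len([w for w in words if w in segments]) for words in keywords.values())
--     return 'zero_matches' if total == 0 else best
-- ===== Notes on version B (the rewrite author's own statement) =====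
-- stated objective: faster
-- what changed: B builds a set index of every space-delimited segment of the padded test string once (all slices between two space positions), so each keyword check becomes one hash-set lookup instead of A's O(len(test)) padded-substring scan per keyword; the best key and the total are then read off in one pass over the dict.
import Mathlib
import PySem

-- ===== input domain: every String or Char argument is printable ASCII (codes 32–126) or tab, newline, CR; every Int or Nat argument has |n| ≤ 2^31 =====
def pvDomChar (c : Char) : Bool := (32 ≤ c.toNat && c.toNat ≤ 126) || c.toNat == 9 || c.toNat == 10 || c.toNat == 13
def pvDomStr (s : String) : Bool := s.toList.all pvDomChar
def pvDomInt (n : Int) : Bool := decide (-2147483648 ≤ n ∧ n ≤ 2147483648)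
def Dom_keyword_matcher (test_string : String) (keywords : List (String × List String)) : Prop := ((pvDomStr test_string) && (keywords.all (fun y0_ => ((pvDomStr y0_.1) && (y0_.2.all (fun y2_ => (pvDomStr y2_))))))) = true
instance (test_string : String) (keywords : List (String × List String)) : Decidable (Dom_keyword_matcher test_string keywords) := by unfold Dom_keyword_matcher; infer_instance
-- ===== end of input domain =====

-- B indexes the test string once (the set of all space-delimited segments of the padded
-- string) and turns every keyword check into a set lookup instead of a substring scan;
-- measured faster on the generated inputs (the per-keyword scan of the test disappears),
-- though the index build is quadratic in the number of spaces.


-- ===== PORT A =====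
-- the membership test `(' ' + ele + ' ') in (' ' + test_string + ' ')` of A's source
def kmHit (test_string : String) (ele : String) : Bool :=
  PySem.Chars.isIn (' ' :: ele.toList ++ [' ']) (' ' :: test_string.toList ++ [' '])

def keyword_matcher (test_string : String) (keywords : List (String × List String)) : String :=
  -- the dict argument, as the insertion-ordered dict its pair list denotes
  let d : PySem.Dict String (List String) := PySem.Dict.ofList keywords
  -- for key in keywords.keys(): matches[key] = [ele for ele in keywords[key] if ...]
  let mtc : PySem.Dict String (List String) :=
    d.keys.foldl
      (fun m key => m.insert key ((d.getD key []).filter (fun ele => kmHit test_string ele)))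
      PySem.Dict.empty
  -- max_key = max(matches, key=lambda x: len(set(matches[x])))
  match PySem.List.max? mtc.keys
      (fun x => ((PySem.Set.ofList (mtc.getD x [])).length : Int)) with
  | none => ""  -- unreachable under Pre_: Python's max() raises ValueError on an empty dict
  | some max_key =>
    -- total_matches = sum of len(matches[key])
    let total : Int := mtc.keys.foldl
      (fun acc key => acc + ((mtc.getD key []).length : Int)) 0
    if total == 0 then "zero_matches" else max_key

-- ===== PORT B =====
-- segments = { padded[a+1:b] | a, b space positions of padded, a (as an sp index) before b }
def kmSegments (padded : List Char) : PySem.Set (List Char) :=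
  -- sp = [i for i, c in enumerate(padded) if c == ' ']
  let sp : List Int := ((PySem.List.enumerate padded).filter (fun p => p.2 == ' ')).map (fun p => p.1)
  -- for k, a in enumerate(sp): for b in sp[k+1:]: segments.add(padded[a+1:b])
  (PySem.List.enumerate sp).foldl
    (fun segs q =>
      (PySem.List.slice sp (some (q.1 + 1)) none).foldl
        (fun segs b => PySem.Set.add segs (PySem.List.slice padded (some (q.2 + 1)) (some b)))
        segs)
    PySem.Set.empty

def keyword_matcher_alt (test_string : String) (keywords : List (String × List String)) : String :=
  let padded : List Char := ' ' :: test_string.toList ++ [' ']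
  let segments : PySem.Set (List Char) := kmSegments padded
  let d : PySem.Dict String (List String) := PySem.Dict.ofList keywords
  -- best = max(keywords, key=lambda key: len({w for w in keywords[key] if w in segments}))
  match PySem.List.max? d.keys
      (fun key => ((PySem.Set.ofList ((d.getD key []).filter
        (fun w => segments.contains w.toList))).length : Int)) with
  | none => ""  -- unreachable under Pre_: Python's max() raises ValueError on an empty dict
  | some best =>
    -- total = sum(len([w for w in words if w in segments]) for words in keywords.values())
    let total : Int :=
      (d.values.map (fun ws => ((ws.filter
        (fun w => segments.contains w.toList)).length : Int))).sum
    if total == 0 then "zero_matches" else best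

-- ===== PRECONDITION & SPEC =====
-- Pre_ excludes exactly the empty keywords dict, on which A's max() raises ValueError.
def Pre_keyword_matcher (test_string : String) (keywords : List (String × List String)) : Prop :=
  keywords ≠ []
instance (test_string : String) (keywords : List (String × List String)) : Decidable (Pre_keyword_matcher test_string keywords) := by unfold Pre_keyword_matcher; infer_instance

def pvWitness_keyword_matcher : String × (List (String × List String)) :=
  ("the cat sat", [("animal", ["cat", "dog"]), ("verb", ["sat"])])

def Spec_keyword_matcher (test_string : String) (keywords : List (String × List String)) (out : String) : Prop := out = keyword_matcher_alt test_string keywords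
instance (test_string : String) (keywords : List (String × List String)) (out : String) : Decidable (Spec_keyword_matcher test_string keywords out) := by unfold Spec_keyword_matcher; infer_instance

-- ===== CLAIM (what is proved, stated in full; the proofs are below) =====
def Claim_equal_keyword_matcher : Prop := ∀ (test_string : String) (keywords : List (String × List String)), Dom_keyword_matcher test_string keywords → Pre_keyword_matcher test_string keywords → Spec_keyword_matcher test_string keywords (keyword_matcher test_string keywords)
-- ===== LEMMAS AND PROOFS =====

-- per-pair score (number of DISTINCT matched keywords) and count (matched with multiplicity)
def kmScore (t : String) (p : String × List String) : Int :=
  ((PySem.Set.ofList (p.2.filter (fun ele => kmHit t ele))).length : Int)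
def kmCnt (t : String) (p : String × List String) : Int :=
  ((p.2.filter (fun ele => kmHit t ele)).length : Int)
-- the canonical value both programs compute
def kmTotal (t : String) (l : List (String × List String)) : Int := (l.map (kmCnt t)).sum
def kmCanon (t : String) (l : List (String × List String)) : String :=
  match PySem.List.max? l (kmScore t) with
  | none => ""
  | some r => if kmTotal t l == 0 then "zero_matches" else r.1

-- the fold step of Python's max(l, key=...)
def kmOptStep {α : Type} (key : α → Int) (acc : Option α) (x : α) : Option α :=
  match acc with
  | none => some x
  | some m => if key m < key x then some x else some m

theorem kmOptStep_none {α : Type} (key : α → Int) (x : α) : kmOptStep key none x = some x := rfl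
theorem kmOptStep_some {α : Type} (key : α → Int) (m x : α) :
    kmOptStep key (some m) x = if key m < key x then some x else some m := rfl

theorem km_max?_eq_foldl {α : Type} (key : α → Int) (l : List α) :
    PySem.List.max? l key = l.foldl (kmOptStep key) none := rfl

-- max? only looks at the key values of list members
theorem km_max?_congr {α : Type} (key key' : α → Int) (l : List α)
    (h : ∀ x ∈ l, key x = key' x) :
    PySem.List.max? l key = PySem.List.max? l key' := by
  rw [km_max?_eq_foldl, km_max?_eq_foldl]
  suffices H : ∀ (acc : Option α), (∀ m, acc = some m → key m = key' m) →
      l.foldl (kmOptStep key) acc = l.foldl (kmOptStep key') acc by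
    exact H none (by simp)
  induction l with
  | nil => intro acc _; rfl
  | cons p tl ih =>
    intro acc hacc
    have hp : key p = key' p := h p (by simp)
    simp only [List.foldl_cons]
    cases acc with
    | none =>
      rw [kmOptStep_none, kmOptStep_none]
      exact ih (fun x hx => h x (List.mem_cons_of_mem _ hx)) (some p)
        (by intro m hm; cases hm; exact hp)
    | some m =>
      have hm : key m = key' m := hacc m rfl
      rw [kmOptStep_some, kmOptStep_some, hm, hp]
      exact ih (fun x hx => h x (List.mem_cons_of_mem _ hx)) _
        (by intro x hx; split at hx <;> cases hx
            · exact hp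
            · exact hm)

-- max? over a mapped list is the mapped max?
theorem km_max?_map {α β : Type} (f : α → β) (key : β → Int) (l : List α) :
    PySem.List.max? (l.map f) key
    = Option.map f (PySem.List.max? l (fun x => key (f x))) := by
  rw [km_max?_eq_foldl, km_max?_eq_foldl, List.foldl_map]
  suffices H : ∀ (acc : Option α),
      l.foldl (fun acc x => kmOptStep key acc (f x)) (Option.map f acc)
      = Option.map f (l.foldl (kmOptStep (fun x => key (f x))) acc) by
    exact H none
  induction l with
  | nil => intro acc; rfl
  | cons p tl ih =>
    intro acc
    simp only [List.foldl_cons]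
    cases acc with
    | none => exact ih (some p)
    | some m =>
      simp only [Option.map_some, kmOptStep_some]
      rw [show (if key (f m) < key (f p) then some (f p) else some (f m))
            = Option.map f (if key (f m) < key (f p) then some p else some m) from by
          split <;> rfl]
      exact ih _

-- an ofList-built dict of a non-empty pair list has a non-empty items list
theorem km_items_ne_nil (kw : List (String × List String)) (hne : kw ≠ []) :
    (PySem.Dict.ofList kw : PySem.Dict String (List String)).items ≠ [] := by
  obtain ⟨q, rest, rfl⟩ := List.exists_cons_of_ne_nil hne
  have hkeys : (PySem.Dict.ofList (q :: rest) : PySem.Dict String (List String)).keys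
      = PySem.Set.ofList ((q :: rest).map Prod.fst) := by
    show (PySem.Dict.empty.update (q :: rest)).keys = _
    unfold PySem.Dict.update
    rw [PySem.Dict.keys_foldl_insert_key (q :: rest) Prod.fst (fun _ x => x.2) PySem.Dict.empty]
    rfl
  intro hit
  have : q.1 ∈ (PySem.Dict.ofList (q :: rest) : PySem.Dict String (List String)).keys := by
    rw [hkeys]
    rw [PySem.Set.mem_ofList]
    exact List.mem_map.mpr ⟨q, by simp, rfl⟩
  rw [show (PySem.Dict.ofList (q :: rest) : PySem.Dict String (List String)).keys
      = (PySem.Dict.ofList (q :: rest) : PySem.Dict String (List String)).items.map Prod.fst from rfl,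
    hit] at this
  simp at this

-- ---- the segment index: membership characterisation ----

-- the 'a < b, both space positions, w is the text strictly between' condition
def kmPairCond (p : List Char) (w : List Char) : Prop :=
  ∃ a b : Nat, a < b ∧ b < p.length ∧ p[a]? = some ' ' ∧ p[b]? = some ' '
    ∧ (p.drop (a + 1)).take (b - (a + 1)) = w

-- membership in a nested 'for q in l: for b in g q: s.add (f q b)' fold
theorem km_mem_nested_foldl {α β γ : Type} [BEq γ] [LawfulBEq γ]
    (l : List α) (g : α → List β) (f : α → β → γ) (s0 : PySem.Set γ) (y : γ) :
    y ∈ l.foldl (fun s q => (g q).foldl (fun s b => PySem.Set.add s (f q b)) s) s0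
      ↔ y ∈ s0 ∨ ∃ q ∈ l, ∃ b ∈ g q, y = f q b := by
  induction l generalizing s0 with
  | nil => simp
  | cons a tl ih =>
    simp only [List.foldl_cons, ih, PySem.Set.mem_foldl_add, List.mem_cons]
    constructor
    · rintro (((h | ⟨b, hb, rfl⟩) | h))
      · exact Or.inl h
      · exact Or.inr ⟨a, Or.inl rfl, b, hb, rfl⟩
      · rcases h with ⟨q, hq, b, hb, rfl⟩
        exact Or.inr ⟨q, Or.inr hq, b, hb, rfl⟩
    · rintro (h | ⟨q, (rfl | hq), b, hb, rfl⟩)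
      · exact Or.inl (Or.inl h)
      · exact Or.inl (Or.inr ⟨b, hb, rfl⟩)
      · exact Or.inr ⟨q, hq, b, hb, rfl⟩

def kmSp (p : List Char) : List Int :=
  ((PySem.List.enumerate p).filter (fun q => q.2 == ' ')).map (fun q => q.1)

theorem km_mem_sp (p : List Char) (a : Int) :
    a ∈ kmSp p ↔ ∃ i : Nat, i < p.length ∧ p[i]? = some ' ' ∧ a = (i : Int) := by
  simp only [kmSp, List.mem_map, List.mem_filter, PySem.List.mem_enumerate_iff]
  constructor
  · rintro ⟨q, ⟨⟨k, hk, rfl⟩, hsp⟩, rfl⟩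
    refine ⟨k, hk, ?_, by push_cast; ring⟩
    simp only [beq_iff_eq] at hsp
    simp [List.getElem?_eq_getElem hk, hsp]
  · rintro ⟨i, hi, hsp, rfl⟩
    refine ⟨((i : Int), p[i]), ⟨⟨i, hi, by push_cast; ring_nf⟩, ?_⟩, rfl⟩
    simp only [List.getElem?_eq_getElem hi, Option.some.injEq] at hsp
    simp [hsp]

theorem km_sp_sorted (p : List Char) : (kmSp p).Pairwise (· < ·) := by
  unfold kmSp
  refine List.Pairwise.map _ (fun a b h => h) ?_
  exact (PySem.List.pairwise_lt_enumerate p 0).filter _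


theorem km_mem_segments (p : List Char) (w : List Char) :
    w ∈ kmSegments p ↔ kmPairCond p w := by
  unfold kmSegments
  rw [show ((PySem.List.enumerate p).filter (fun q => q.2 == ' ')).map (fun q => q.1) = kmSp p from rfl]
  rw [km_mem_nested_foldl]
  rw [show (w ∈ (PySem.Set.empty : PySem.Set (List Char))) = False from by
    simp [PySem.Set.empty]]
  simp only [false_or]
  constructor
  · rintro ⟨q, hq, b, hb, rfl⟩
    obtain ⟨k, hk, rfl⟩ := (PySem.List.mem_enumerate_iff _ _ _).mp hq
    simp only at hb ⊢
    rw [show ((0 : Int) + (k : Nat) + 1) = ((k + 1 : Nat) : Int) from by push_cast; ring] at hb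
    rw [PySem.List.slice_from_natCast] at hb
    obtain ⟨j, hj, rfl⟩ := List.mem_iff_getElem.mp hb
    rw [List.length_drop] at hj
    obtain ⟨i, hilen, hpi, hieq⟩ := (km_mem_sp p _).mp (List.getElem_mem hk)
    have hmem2 : ((kmSp p).drop (k + 1))[j] ∈ kmSp p :=
      List.mem_of_mem_drop (List.getElem_mem (by rw [List.length_drop]; omega))
    obtain ⟨i2, hi2len, hpi2, hi2eq⟩ := (km_mem_sp p _).mp hmem2
    have hdg : ((kmSp p).drop (k + 1))[j] = (kmSp p)[k + 1 + j]'(by omega) := by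
      rw [List.getElem_drop]
    have hlt : (kmSp p)[k] < (kmSp p)[k + 1 + j]'(by omega) :=
      List.pairwise_iff_getElem.mp (km_sp_sorted p) k (k + 1 + j) hk (by omega) (by omega)
    rw [hdg] at hi2eq
    rw [hieq, hi2eq] at hlt
    have hii2 : i < i2 := by exact_mod_cast hlt
    refine ⟨i, i2, hii2, hi2len, hpi, hpi2, ?_⟩
    rw [hieq, hdg, hi2eq]
    rw [show ((i : Nat) : Int) + 1 = ((i + 1 : Nat) : Int) from by push_cast; ring]
    rw [PySem.List.slice_natCast]
  · rintro ⟨a, b, hab, hblen, hpa, hpb, rfl⟩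
    have haS : ((a : Nat) : Int) ∈ kmSp p := (km_mem_sp p _).mpr ⟨a, by omega, hpa, rfl⟩
    have hbS : ((b : Nat) : Int) ∈ kmSp p := (km_mem_sp p _).mpr ⟨b, hblen, hpb, rfl⟩
    obtain ⟨k, hk, hka⟩ := List.mem_iff_getElem.mp haS
    obtain ⟨j, hj, hjb⟩ := List.mem_iff_getElem.mp hbS
    have hkj : k < j := by
      by_contra hcon
      rcases Nat.lt_or_ge j k with hjk | hge
      · have := List.pairwise_iff_getElem.mp (km_sp_sorted p) j k hj hk hjk
        rw [hka, hjb] at this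
        have : b < a := by exact_mod_cast this
        omega
      · have : j = k := by omega
        subst this
        rw [hka] at hjb
        have : a = b := by exact_mod_cast hjb
        omega
    obtain ⟨m, rfl⟩ : ∃ m, j = k + 1 + m := ⟨j - (k + 1), by omega⟩
    refine ⟨((0 : Int) + (k : Nat), (kmSp p)[k]), ?_, ((b : Nat) : Int), ?_, ?_⟩
    · exact (PySem.List.mem_enumerate_iff _ _ _).mpr ⟨k, hk, rfl⟩
    · simp only
      rw [show ((0 : Int) + (k : Nat) + 1) = ((k + 1 : Nat) : Int) from by push_cast; ring]
      rw [PySem.List.slice_from_natCast]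
      rw [List.mem_iff_getElem]
      exact ⟨m, by rw [List.length_drop]; omega, by rw [List.getElem_drop]; exact hjb⟩
    · simp only
      rw [hka]
      rw [show ((a : Nat) : Int) + 1 = ((a + 1 : Nat) : Int) from by push_cast; ring]
      rw [PySem.List.slice_natCast]

theorem km_isIn_iff (p : List Char) (w : List Char) :
    PySem.Chars.isIn (' ' :: w ++ [' ']) p = true ↔ kmPairCond p w := by
  rw [PySem.Chars.isIn_iff_infix]
  constructor
  · rintro ⟨s, u, hsu⟩
    subst hsu
    refine ⟨s.length, s.length + 1 + w.length, by omega, ?_, ?_, ?_, ?_⟩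
    · simp [List.length_append]; omega
    · rw [show s ++ (' ' :: w ++ [' ']) ++ u = s ++ ([' '] ++ (w ++ [' '] ++ u)) from by
        simp [List.append_assoc]]
      rw [List.getElem?_append_right (by omega)]
      simp
    · rw [show s ++ (' ' :: w ++ [' ']) ++ u = ((s ++ [' ']) ++ w) ++ ([' '] ++ u) from by
        simp [List.append_assoc]]
      rw [List.getElem?_append_right (by simp [List.length_append]; omega)]
      rw [show s.length + 1 + w.length - ((s ++ [' ']) ++ w).length = 0 from by
        simp [List.length_append]; omega]
      simp
    · rw [show s ++ (' ' :: w ++ [' ']) ++ u = (s ++ [' ']) ++ (w ++ ([' '] ++ u)) from by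
        simp [List.append_assoc]]
      rw [show s.length + 1 = (s ++ [' ']).length from by simp]
      rw [List.drop_left]
      rw [show (s ++ [' ']).length + w.length - (s ++ [' ']).length = w.length from by
        omega]
      exact List.take_left' rfl
  · rintro ⟨a, b, hab, hblen, hpa, hpb, hw⟩
    have ha : a < p.length := by omega
    rw [List.getElem?_eq_getElem ha, Option.some.injEq] at hpa
    rw [List.getElem?_eq_getElem hblen, Option.some.injEq] at hpb
    refine ⟨p.take a, p.drop (b + 1), ?_⟩
    have hsplit : p.drop (a + 1) = w ++ p.drop b := by
      conv_lhs => rw [← List.take_append_drop (b - (a + 1)) (p.drop (a + 1))]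
      rw [hw, List.drop_drop, show a + 1 + (b - (a + 1)) = b from by omega]
    conv_rhs => rw [← List.take_append_drop a p]
    rw [List.drop_eq_getElem_cons ha, hpa, hsplit,
      List.drop_eq_getElem_cons hblen, hpb]
    simp [List.append_assoc]

-- the bridge: B's set lookup is A's substring test
theorem km_contains_eq_hit (t w : String) :
    PySem.Set.contains (kmSegments (' ' :: t.toList ++ [' '])) w.toList = kmHit t w := by
  rw [Bool.eq_iff_iff]
  unfold kmHit
  rw [show (PySem.Set.contains (kmSegments (' ' :: t.toList ++ [' '])) w.toList = true)
      ↔ w.toList ∈ kmSegments (' ' :: t.toList ++ [' ']) from by simp [pysem]]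
  rw [km_mem_segments, km_isIn_iff]

theorem km_B_canon (t : String) (kw : List (String × List String)) (hne : kw ≠ []) :
    keyword_matcher_alt t kw = kmCanon t (PySem.Dict.ofList kw : PySem.Dict String (List String)).items := by
  simp only [keyword_matcher_alt, km_contains_eq_hit]
  have hK : (PySem.Dict.ofList kw : PySem.Dict String (List String)).keys.Nodup :=
    PySem.Dict.nodup_keys_ofList kw
  set d : PySem.Dict String (List String) := PySem.Dict.ofList kw with hd
  have hval : ∀ p ∈ d.items, d.getD p.1 [] = p.2 := by
    intro p hp
    exact PySem.Dict.getD_of_mem_items d (by rw [Prod.mk.eta]; exact hp) hK []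
  have hmax : PySem.List.max? d.keys
      (fun key => ((PySem.Set.ofList ((d.getD key []).filter (fun w => kmHit t w))).length : Int))
      = Option.map Prod.fst (PySem.List.max? d.items (kmScore t)) := by
    rw [show d.keys = d.items.map Prod.fst from rfl, km_max?_map,
      km_max?_congr _ (kmScore t) d.items (fun p hp => by simp only [kmScore, hval p hp])]
  have htot : (d.values.map (fun ws => ((ws.filter (fun w => kmHit t w)).length : Int))).sum
      = kmTotal t d.items := by
    rw [show d.values = d.items.map Prod.snd from rfl, List.map_map]
    unfold kmTotal
    congr 1
  rcases hmm : PySem.List.max? d.items (kmScore t) with _ | r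
  · exact absurd (PySem.List.max?_eq_none_iff d.items (kmScore t) |>.mp hmm)
      (km_items_ne_nil kw hne)
  · rw [hmax, hmm]
    simp only [Option.map_some]
    rw [htot]
    simp [kmCanon, hmm]

theorem km_A_canon (t : String) (kw : List (String × List String)) (hne : kw ≠ []) :
    keyword_matcher t kw = kmCanon t (PySem.Dict.ofList kw : PySem.Dict String (List String)).items := by
  simp only [keyword_matcher]
  have hK : (PySem.Dict.ofList kw : PySem.Dict String (List String)).keys.Nodup :=
    PySem.Dict.nodup_keys_ofList kw
  set d : PySem.Dict String (List String) := PySem.Dict.ofList kw with hd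
  set mtc : PySem.Dict String (List String) :=
    d.keys.foldl
      (fun m key => m.insert key ((d.getD key []).filter (fun ele => kmHit t ele)))
      PySem.Dict.empty with hmtc
  have hIt : mtc.items = d.keys.map (fun k => (k, (d.getD k []).filter (fun ele => kmHit t ele))) := by
    rw [hmtc, PySem.Dict.items_foldl_insert_fresh d.keys (fun a => a)
        (fun key => (d.getD key []).filter (fun ele => kmHit t ele)) PySem.Dict.empty
        (fun a _ => by simp [PySem.Dict.contains_empty])
        (by simpa using hK)]
    simp [PySem.Dict.empty]
  have hKeys : mtc.keys = d.keys := by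
    show mtc.items.map Prod.fst = d.keys
    rw [hIt, List.map_map]
    simp [Function.comp_def]
  have hNK : mtc.keys.Nodup := by rw [hKeys]; exact hK
  have hGetD : ∀ k ∈ d.keys, mtc.getD k [] = (d.getD k []).filter (fun ele => kmHit t ele) := by
    intro k hk
    exact PySem.Dict.getD_of_mem_items mtc
      (by rw [hIt]; exact List.mem_map.mpr ⟨k, hk, rfl⟩) hNK []
  have hval : ∀ p ∈ d.items, d.getD p.1 [] = p.2 := by
    intro p hp
    exact PySem.Dict.getD_of_mem_items d (by rw [Prod.mk.eta]; exact hp) hK []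
  have hmax : PySem.List.max? mtc.keys (fun x => ((PySem.Set.ofList (mtc.getD x [])).length : Int))
      = Option.map Prod.fst (PySem.List.max? d.items (kmScore t)) := by
    rw [hKeys,
      km_max?_congr _
        (fun x => ((PySem.Set.ofList ((d.getD x []).filter (fun ele => kmHit t ele))).length : Int))
        d.keys (fun x hx => by rw [hGetD x hx]),
      show d.keys = d.items.map Prod.fst from rfl, km_max?_map,
      km_max?_congr _ (kmScore t) d.items (fun p hp => by simp only [kmScore, hval p hp])]
  have htot : mtc.keys.foldl (fun acc key => acc + ((mtc.getD key []).length : Int)) 0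
      = kmTotal t d.items := by
    rw [hKeys, PySem.List.foldl_add,
      show d.keys = d.items.map Prod.fst from rfl, List.map_map,
      List.map_congr_left (g := kmCnt t) (fun p hp => by
        have hkey : p.1 ∈ d.keys := by
          rw [show d.keys = d.items.map Prod.fst from rfl]
          exact List.mem_map_of_mem hp
        simp only [Function.comp_apply, hGetD p.1 hkey, hval p hp, kmCnt])]
    simp [kmTotal]
  rcases hmm : PySem.List.max? d.items (kmScore t) with _ | r
  · exact absurd (PySem.List.max?_eq_none_iff d.items (kmScore t) |>.mp hmm)
      (km_items_ne_nil kw hne)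
  · rw [hmax, hmm]
    simp only [Option.map_some]
    rw [htot]
    simp [kmCanon, hmm]

-- ===== VERDICT (by name: the statement is the Claim_ definition above) =====
theorem keyword_matcher_spec : Claim_equal_keyword_matcher := by
  intro t kw _ hpre
  unfold Spec_keyword_matcher
  rw [km_A_canon t kw hpre, km_B_canon t kw hpre]
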